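-- pv_equiv track=rewrite | github.com/powert1p/kodi-web | backend/core/grading.py | _strip_wrapping
-- ===== SOURCE A (Python) =====
-- def _strip_wrapping(text: str) -> str:
--     """Remove wrapping parentheses or braces if balanced inside."""
--     if len(text) < 2:
--         return text
--     if (text[0] == "(" and text[-1] == ")") or \
--        (text[0] == "{" and text[-1] == "}"):
--         inner = text[1:-1]
--         opener = text[0]
--         closer = text[-1]
--         depth = 0
--         balanced = True
--         for ch in inner:
--             if ch == opener:
--                 depth += 1
--             elif ch == closer:
--                 depth -= 1
--             if depth < 0:
--                 balanced = False
--                 break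
--         if balanced and depth == 0:
--             return inner
--     return text
-- ===== SOURCE B (Python) =====
-- def _strip_wrapping(text: str) -> str:
--     """Remove wrapping parentheses or braces if balanced inside."""
--     if len(text) < 2:
--         return text
--     o, c = text[0], text[-1]
--     if (o, c) != ("(", ")") and (o, c) != ("{", "}"):
--         return text
--     inner = text[1:-1]
--     opens = [i for i, ch in enumerate(inner) if ch == o]
--     closes = [i for i, ch in enumerate(inner) if ch == c]
--     if len(opens) == len(closes) and all(p < q for p, q in zip(opens, closes)):
--         return inner
--     return text
-- ===== Notes on version B (the rewrite author's own statement) =====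
-- stated objective: alternative
-- what changed: B drops the running depth counter entirely: it builds the index lists of openers and closers in the inner slice and strips iff the lists have equal length and the k-th opener index precedes the k-th closer index for every k (the static Dyck criterion), instead of A's single stateful scan with a depth/balanced flag and early break.
import Mathlib
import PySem

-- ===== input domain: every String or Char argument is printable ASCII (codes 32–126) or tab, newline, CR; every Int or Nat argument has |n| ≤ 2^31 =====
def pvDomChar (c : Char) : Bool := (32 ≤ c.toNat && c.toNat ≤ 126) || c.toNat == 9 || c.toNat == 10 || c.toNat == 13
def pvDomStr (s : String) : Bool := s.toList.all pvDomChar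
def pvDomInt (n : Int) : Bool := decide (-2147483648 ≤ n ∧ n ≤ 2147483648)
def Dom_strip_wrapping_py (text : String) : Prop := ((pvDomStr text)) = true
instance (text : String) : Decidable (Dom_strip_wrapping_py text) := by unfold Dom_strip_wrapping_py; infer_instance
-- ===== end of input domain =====

-- B replaces A's running-depth scan with a static Dyck criterion: collect the index lists of
-- openers and closers and strip iff the counts agree and the k-th opener precedes the k-th
-- closer for every k (objective: alternative).

-- ===== PORT A =====
-- the for-loop over `inner` with state (depth, balanced) and early break on depth < 0
def stripALoop (opener closer : Char) : Int → List Char → Int × Bool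
  | depth, [] => (depth, true)
  | depth, ch :: rest =>
      let depth' := if ch = opener then depth + 1
                    else if ch = closer then depth - 1 else depth
      if depth' < 0 then (depth', false)
      else stripALoop opener closer depth' rest

def strip_wrapping_py (text : String) : String :=
  let cs := text.toList
  if cs.length < 2 then text
  else
    if ((PySem.List.pyGet? cs 0).getD ' ' = '(' ∧ (PySem.List.pyGet? cs (-1)).getD ' ' = ')')
       ∨ ((PySem.List.pyGet? cs 0).getD ' ' = '{' ∧ (PySem.List.pyGet? cs (-1)).getD ' ' = '}') then
      let inner := PySem.List.slice cs (some 1) (some (-1))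
      let opener := (PySem.List.pyGet? cs 0).getD ' '
      let closer := (PySem.List.pyGet? cs (-1)).getD ' '
      let r := stripALoop opener closer 0 inner
      if r.2 ∧ r.1 = 0 then String.ofList inner else text
    else text

-- ===== PORT B =====
-- [i for i, ch in enumerate(...) if ch == t], with enumeration starting at i
def idxsFrom (t : Char) : Nat → List Char → List Nat
  | _, [] => []
  | i, ch :: rest => if ch = t then i :: idxsFrom t (i + 1) rest else idxsFrom t (i + 1) rest

def strip_wrapping_py_alt (text : String) : String :=
  let cs := text.toList
  if cs.length < 2 then text
  else
    let o := (PySem.List.pyGet? cs 0).getD ' '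
    let c := (PySem.List.pyGet? cs (-1)).getD ' '
    if ¬((o, c) = ('(', ')') ∨ (o, c) = ('{', '}')) then text
    else
      let inner := PySem.List.slice cs (some 1) (some (-1))
      let opens := idxsFrom o 0 inner
      let closes := idxsFrom c 0 inner
      if opens.length = closes.length ∧ (opens.zip closes).all (fun p => p.1 < p.2) = true
      then String.ofList inner else text

-- ===== PRECONDITION & SPEC =====
def Spec_strip_wrapping_py (text : String) (out : String) : Prop := out = strip_wrapping_py_alt text
instance (text : String) (out : String) : Decidable (Spec_strip_wrapping_py text out) := by unfold Spec_strip_wrapping_py; infer_instance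

-- ===== CLAIM (what is proved, stated in full; the proofs are below) =====
def Claim_equal_strip_wrapping_py : Prop := ∀ (text : String), Dom_strip_wrapping_py text → Spec_strip_wrapping_py text (strip_wrapping_py text)

-- ===== LEMMAS AND PROOFS =====

-- every index produced by idxsFrom starting at i is ≥ i
theorem idxsFrom_ge (t : Char) : ∀ (l : List Char) (i x : Nat), x ∈ idxsFrom t i l → i ≤ x := by
  intro l
  induction l with
  | nil => intro i x h; simp [idxsFrom] at h
  | cons ch rest ih =>
      intro i x h
      simp only [idxsFrom] at h
      by_cases hc : ch = t
      · rw [if_pos hc] at h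
        rcases List.mem_cons.mp h with h | h
        · omega
        · have := ih (i + 1) x h; omega
      · rw [if_neg hc] at h
        have := ih (i + 1) x h; omega

-- (xs.zip ys).all (· < ·) says exactly: wherever both indices are defined, the entries compare
theorem zip_all_iff : ∀ (xs ys : List Nat),
    ((xs.zip ys).all (fun p : Nat × Nat => decide (p.1 < p.2)) = true ↔
      ∀ (k a b : Nat), xs[k]? = some a → ys[k]? = some b → a < b) := by
  intro xs
  induction xs with
  | nil => intro ys; simp
  | cons x xs' ih =>
      intro ys
      cases ys with
      | nil => simp
      | cons y ys' =>
          simp only [List.zip_cons_cons, List.all_cons, Bool.and_eq_true, decide_eq_true_eq]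
          constructor
          · rintro ⟨h1, h2⟩ k a b ha hb
            cases k with
            | zero =>
                simp only [List.getElem?_cons_zero, Option.some.injEq] at ha hb
                omega
            | succ k' =>
                simp only [List.getElem?_cons_succ] at ha hb
                exact (ih ys').mp h2 k' a b ha hb
          · intro h
            refine ⟨h 0 x y (by simp) (by simp), (ih ys').mpr ?_⟩
            intro k a b ha hb
            exact h (k + 1) a b (by simpa using ha) (by simpa using hb)

-- core invariant: A's depth scan from depth d accepts iff the closer-index list is exactly d
-- longer than the opener-index list and the k-th opener precedes the (k+d)-th closer
theorem scan_iff_idx (o c : Char) (hne : o ≠ c) :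
    ∀ (l : List Char) (d i : Nat),
      (stripALoop o c (d : Int) l = (0, true) ↔
        ((idxsFrom c i l).length = (idxsFrom o i l).length + d ∧
          ∀ k a b, (idxsFrom o i l)[k]? = some a → (idxsFrom c i l)[k + d]? = some b → a < b)) := by
  intro l
  induction l with
  | nil =>
      intro d i
      simp only [stripALoop, idxsFrom, List.length_nil, Prod.mk.injEq]
      constructor
      · rintro ⟨h, -⟩
        refine ⟨by omega, ?_⟩
        intro k a b ha
        simp at ha
      · rintro ⟨h, -⟩
        exact ⟨by omega, trivial⟩
  | cons ch rest ih =>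
      intro d i
      simp only [stripALoop, idxsFrom]
      by_cases hcho : ch = o
      · have hchc : ¬ ch = c := by rw [hcho]; exact hne
        rw [if_pos hcho, if_neg hchc, if_neg (by omega : ¬ (d : Int) + 1 < 0)]
        have hcast : (d : Int) + 1 = ((d + 1 : Nat) : Int) := by push_cast; ring
        rw [hcast, ih (d + 1) (i + 1), if_pos hcho]
        constructor
        · rintro ⟨hl, hz⟩
          refine ⟨by simp only [List.length_cons]; omega, ?_⟩
          intro k a b ha hb
          cases k with
          | zero =>
              simp only [List.getElem?_cons_zero, Option.some.injEq] at ha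
              have hbmem : b ∈ idxsFrom c (i + 1) rest := List.mem_of_getElem? hb
              have := idxsFrom_ge c rest (i + 1) b hbmem
              omega
          | succ k' =>
              simp only [List.getElem?_cons_succ] at ha
              have hidx : k' + 1 + d = k' + (d + 1) := by omega
              rw [hidx] at hb
              exact hz k' a b ha hb
        · rintro ⟨hl, hz⟩
          refine ⟨by simp only [List.length_cons] at hl; omega, ?_⟩
          intro k a b ha hb
          have hidx : k + (d + 1) = k + 1 + d := by omega
          rw [hidx] at hb
          exact hz (k + 1) a b (by simpa using ha) hb
      · by_cases hchc : ch = c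
        · rw [if_neg hcho, if_pos hchc, if_neg hcho, if_pos hchc]
          cases d with
          | zero =>
              rw [if_pos (by norm_num : ((0 : Nat) : Int) - 1 < 0)]
              constructor
              · intro h
                exact absurd (congrArg Prod.snd h) (by decide)
              · rintro ⟨hl, hz⟩
                exfalso
                cases hop : idxsFrom o (i + 1) rest with
                | nil => rw [hop] at hl; simp at hl
                | cons a tl =>
                    rw [hop] at hl hz
                    have ha : (a :: tl)[0]? = some a := by simp
                    have hb : (i :: idxsFrom c (i + 1) rest)[0 + 0]? = some i := by simp
                    have hlt := hz 0 a i ha hb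
                    have hamem : a ∈ idxsFrom o (i + 1) rest := by
                      rw [hop]; exact List.mem_cons_self
                    have := idxsFrom_ge o rest (i + 1) a hamem
                    omega
          | succ d'' =>
              rw [if_neg (by push_cast; omega : ¬ ((d'' + 1 : Nat) : Int) - 1 < 0)]
              have hcast : ((d'' + 1 : Nat) : Int) - 1 = ((d'' : Nat) : Int) := by push_cast; ring
              rw [hcast, ih d'' (i + 1)]
              constructor
              · rintro ⟨hl, hz⟩
                refine ⟨by simp only [List.length_cons]; omega, ?_⟩
                intro k a b ha hb
                have hidx : k + (d'' + 1) = (k + d'') + 1 := by omega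
                rw [hidx, List.getElem?_cons_succ] at hb
                exact hz k a b ha hb
              · rintro ⟨hl, hz⟩
                refine ⟨by simp only [List.length_cons] at hl; omega, ?_⟩
                intro k a b ha hb
                apply hz k a b ha
                have hidx : k + (d'' + 1) = (k + d'') + 1 := by omega
                rw [hidx, List.getElem?_cons_succ]
                exact hb
        · rw [if_neg hcho, if_neg hchc, if_neg (by omega : ¬ (d : Int) < 0),
              if_neg hcho, if_neg hchc]
          exact ih d (i + 1)

theorem strip_tail_decomp (c0 : Char) (rest : List Char) (h : rest ≠ []) :
    c0 :: rest = c0 :: rest.dropLast ++ [rest.getLast h] := by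
  simp [List.dropLast_append_getLast h]

theorem slice_one_neg_one (c0 cl : Char) (mid : List Char) :
    PySem.List.slice (c0 :: mid ++ [cl]) (some 1) (some (-1)) = mid := by
  simp [PySem.List.slice, PySem.List.clampIdx]
  rw [if_neg (by omega)]
  simp

-- ===== VERDICT (by name: the statement is the Claim_ definition above) =====
theorem strip_wrapping_py_spec : Claim_equal_strip_wrapping_py := by
  intro text _
  unfold Spec_strip_wrapping_py strip_wrapping_py strip_wrapping_py_alt
  set cs := text.toList with hcs
  by_cases hlen : cs.length < 2
  · simp [hlen]
  · rw [if_neg hlen, if_neg hlen]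
    obtain ⟨c0, rest, hrest⟩ : ∃ c0 rest, cs = c0 :: rest := by
      cases h : cs with
      | nil => exfalso; rw [h] at hlen; simp at hlen
      | cons a b => exact ⟨a, b, rfl⟩
    have hrne : rest ≠ [] := by
      intro h; rw [hrest, h] at hlen; simp at hlen
    obtain ⟨mid, cl, hdec⟩ : ∃ mid cl, cs = c0 :: mid ++ [cl] :=
      ⟨rest.dropLast, rest.getLast hrne, by rw [hrest]; exact strip_tail_decomp c0 rest hrne⟩
    have hget0 : (PySem.List.pyGet? cs 0).getD ' ' = c0 := by
      rw [hdec]; simp [PySem.List.pyGet?_zero_cons]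
    have hgetl : (PySem.List.pyGet? cs (-1)).getD ' ' = cl := by
      rw [hdec]
      rw [show c0 :: mid ++ [cl] = (c0 :: mid) ++ [cl] by simp]
      rw [PySem.List.pyGet?_neg_one_append_singleton]
      rfl
    have hslice : PySem.List.slice cs (some 1) (some (-1)) = mid := by
      rw [hdec]; exact slice_one_neg_one c0 cl mid
    rw [hget0, hgetl, hslice]
    by_cases hpair : (c0 = '(' ∧ cl = ')') ∨ (c0 = '{' ∧ cl = '}')
    · have hpair' : (c0, cl) = ('(', ')') ∨ (c0, cl) = ('{', '}') := by
        rcases hpair with ⟨h1, h2⟩ | ⟨h1, h2⟩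
        · left; rw [h1, h2]
        · right; rw [h1, h2]
      rw [if_pos hpair, if_neg (not_not_intro hpair')]
      have hne : c0 ≠ cl := by
        rcases hpair with ⟨h1, h2⟩ | ⟨h1, h2⟩ <;> rw [h1, h2] <;> decide
      have hkey := scan_iff_idx c0 cl hne mid 0 0
      rw [Nat.cast_zero] at hkey
      by_cases hbal : stripALoop c0 cl 0 mid = (0, true)
      · obtain ⟨hl, hz⟩ := hkey.mp hbal
        rw [if_pos (show (stripALoop c0 cl 0 mid).2 = true ∧ (stripALoop c0 cl 0 mid).1 = 0 by
          rw [hbal]; exact ⟨rfl, rfl⟩)]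
        rw [if_pos (show (idxsFrom c0 0 mid).length = (idxsFrom cl 0 mid).length ∧
            ((idxsFrom c0 0 mid).zip (idxsFrom cl 0 mid)).all (fun p => decide (p.1 < p.2)) = true by
          refine ⟨by omega, (zip_all_iff _ _).mpr ?_⟩
          intro k a b ha hb
          exact hz k a b ha (by simpa using hb))]
      · rw [if_neg (show ¬ ((stripALoop c0 cl 0 mid).2 = true ∧ (stripALoop c0 cl 0 mid).1 = 0) by
          rintro ⟨ha, hb⟩
          exact hbal (by rw [Prod.ext_iff]; exact ⟨hb, ha⟩))]
        rw [if_neg (show ¬ ((idxsFrom c0 0 mid).length = (idxsFrom cl 0 mid).length ∧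
            ((idxsFrom c0 0 mid).zip (idxsFrom cl 0 mid)).all (fun p => decide (p.1 < p.2)) = true) by
          rintro ⟨hl, hz⟩
          apply hbal
          apply hkey.mpr
          refine ⟨by omega, ?_⟩
          intro k a b ha hb
          exact (zip_all_iff _ _).mp hz k a b ha (by simpa using hb))]
    · have hpair' : ¬ ((c0, cl) = ('(', ')') ∨ (c0, cl) = ('{', '}')) := by
        intro h; apply hpair
        rcases h with h | h
        · left; exact ⟨congrArg Prod.fst h, congrArg Prod.snd h⟩
        · right; exact ⟨congrArg Prod.fst h, congrArg Prod.snd h⟩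
      rw [if_neg hpair, if_pos hpair']
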